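-- pv_equiv track=rewrite | github.com/axpokl/LightOut | ManimGL2/lights_out_gl2 - 副本 (83).py | make_mat_d
-- ===== SOURCE A (Python) =====
-- def make_mat_d(n):
--     I = [[1 if i == j else 0 for i in range(n)] for j in range(n)]
--     Z = [[0]*n for _ in range(n)]
--     M = [[[0]*n for _ in range(n)] for _ in range(n+1)]
--     def v(A, y, x):
--         return A[y][x] if 0 <= x < n else 0
--     for y in range(n):
--         for x in range(n):
--             M[0][y][x] = I[y][x]
--     for k in range(1, n+1):
--         A = M[k-1]
--         B = M[k-2] if k-2 >= 0 else Z
--         for y in range(n):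
--             for x in range(n):
--                 M[k][y][x] = v(A, y, x-1) ^ v(A, y, x+1)
--     return M
-- ===== SOURCE B (Python) =====
-- def make_mat_d(n):
--     mask = (1 << n) - 1 if n >= 0 else 0
--     rows = [1 << y for y in range(n)]
--     M = []
--     for k in range(n + 1):
--         M.append([[(r >> x) & 1 for x in range(n)] for r in rows])
--         rows = [((r << 1) ^ (r >> 1)) & mask for r in rows]
--     return M
-- ===== Notes on version B (the rewrite author's own statement) =====
-- stated objective: alternative
-- what changed: A builds each layer cell-by-cell with a guarded neighbor-XOR function over nested y/x loops on list-of-list matrices; B represents each row as a single integer bitmask advanced with (r<<1)^(r>>1)&mask, so the inner per-cell recurrence disappears and bits are only unpacked for output.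
import Mathlib
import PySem

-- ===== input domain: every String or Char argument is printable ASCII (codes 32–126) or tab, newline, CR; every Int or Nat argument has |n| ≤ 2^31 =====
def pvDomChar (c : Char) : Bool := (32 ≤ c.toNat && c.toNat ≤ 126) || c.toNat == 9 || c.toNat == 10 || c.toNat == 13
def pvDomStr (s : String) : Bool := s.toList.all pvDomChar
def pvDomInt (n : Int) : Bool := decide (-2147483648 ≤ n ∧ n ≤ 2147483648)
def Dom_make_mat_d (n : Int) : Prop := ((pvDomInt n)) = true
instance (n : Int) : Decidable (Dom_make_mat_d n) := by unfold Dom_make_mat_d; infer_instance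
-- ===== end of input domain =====

-- B replaces A's per-cell neighbor-XOR recurrence by GF(2) row bitmasks updated with
-- integer shift/xor/mask steps, unpacking bits only for output (alternative data structure).


-- ===== PORT A =====
-- v(A, y, x): the guarded lookup; inside the guard the Python indices are in range,
-- so total pyGetD is exact there.
def pvV (n : Int) (A : List (List Int)) (y x : Int) : Int :=
  if 0 ≤ x ∧ x < n then PySem.List.pyGetD (PySem.List.pyGetD A y []) x 0 else 0

def make_mat_d (n : Int) : List (List (List Int)) :=
  let I := (PySem.List.pyRange 0 n).map (fun j =>
    (PySem.List.pyRange 0 n).map (fun i => if i = j then (1:Int) else 0))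
  let Z := (PySem.List.pyRange 0 n).map (fun _ => List.replicate n.toNat (0:Int))
  let M0 := (PySem.List.pyRange 0 (n+1)).map (fun _ =>
    (PySem.List.pyRange 0 n).map (fun _ => List.replicate n.toNat (0:Int)))
  -- for y in range(n): for x in range(n): M[0][y][x] = I[y][x]   (loop indices are ≥ 0)
  let M1 := (PySem.List.pyRange 0 n).foldl (fun M y =>
    (PySem.List.pyRange 0 n).foldl (fun M x =>
      M.modify 0 (fun L => L.modify y.toNat (fun row => row.set x.toNat
        (PySem.List.pyGetD (PySem.List.pyGetD I y []) x 0)))) M) M0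
  -- for k in range(1, n+1): …  (A aliases M[k-1], which iteration k never writes,
  -- so capturing it as a value before the inner loops is exact; B is computed but unused)
  (PySem.List.pyRange 1 (n+1)).foldl (fun M k =>
    let A := PySem.List.pyGetD M (k-1) []
    let _B := if 0 ≤ k-2 then PySem.List.pyGetD M (k-2) [] else Z
    (PySem.List.pyRange 0 n).foldl (fun M y =>
      (PySem.List.pyRange 0 n).foldl (fun M x =>
        M.modify k.toNat (fun L => L.modify y.toNat (fun row => row.set x.toNat
          (PySem.Int.bxor (pvV n A y (x-1)) (pvV n A y (x+1)))))) M) M) M1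

-- ===== PORT B =====
def make_mat_d_alt (n : Int) : List (List (List Int)) :=
  -- mask = (1 << n) - 1 if n >= 0 else 0 ; the shift amount n.toNat is exact since n ≥ 0 there
  let mask : Int := if 0 ≤ n then (1:Int) <<< n.toNat - 1 else 0
  -- rows = [1 << y for y in range(n)]   (y ≥ 0, so y.toNat is exact)
  let rows : List Int := (PySem.List.pyRange 0 n).map (fun y => (1:Int) <<< y.toNat)
  (((PySem.List.pyRange 0 (n+1)).foldl
    (fun (st : List (List (List Int)) × List Int) _k =>
      (st.1 ++ [st.2.map (fun (r : Int) =>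
          (PySem.List.pyRange 0 n).map (fun x => PySem.Int.band ((r >>> x.toNat : Int)) 1))],
       st.2.map (fun (r : Int) => PySem.Int.band (PySem.Int.bxor (r <<< (1:Nat)) (r >>> (1:Nat))) mask)))
    (([], rows) : List (List (List Int)) × List Int)).1)

-- ===== PRECONDITION & SPEC =====
def Spec_make_mat_d (n : Int) (out : List (List (List Int))) : Prop := out = make_mat_d_alt n
instance (n : Int) (out : List (List (List Int))) : Decidable (Spec_make_mat_d n out) := by unfold Spec_make_mat_d; infer_instance

-- ===== CLAIM (what is proved, stated in full; the proofs are below) =====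
def Claim_equal_make_mat_d : Prop := ∀ (n : Int), Dom_make_mat_d n → Spec_make_mat_d n (make_mat_d n)

-- ===== LEMMAS AND PROOFS =====

-- Common mathematical description: the GF(2) row masks and cells.
def pvStep (N r : Nat) : Nat := ((r <<< 1) ^^^ (r >>> 1)) &&& (2 ^ N - 1)

def pvR (N y : Nat) : Nat → Nat
  | 0 => 2 ^ y
  | k + 1 => pvStep N (pvR N y k)

def pvCell (N y k x : Nat) : Int := if (pvR N y k).testBit x then 1 else 0

def pvLayer (N k : Nat) : List (List Int) :=
  (List.range N).map (fun y => (List.range N).map (fun x => pvCell N y k x))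

def pvSpecM (N : Nat) : List (List (List Int)) := (List.range (N + 1)).map (pvLayer N)

-- A-side cell recurrence (Nat indices).
def pvCA (N y : Nat) : Nat → Nat → Int
  | 0, x => if x = y then 1 else 0
  | k + 1, x => PySem.Int.bxor (if 1 ≤ x then pvCA N y k (x - 1) else 0)
      (if x + 1 < N then pvCA N y k (x + 1) else 0)

def pvLayerA (N k : Nat) : List (List Int) :=
  (List.range N).map (fun y => (List.range N).map (fun x => pvCA N y k x))

-- bit arithmetic
theorem pvR_lt (N y k : Nat) (hy : y < N) : pvR N y k < 2 ^ N := by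
  cases k with
  | zero => exact Nat.pow_lt_pow_right (by norm_num) hy
  | succ k =>
      have h1 : (1:Nat) ≤ 2 ^ N := Nat.one_le_two_pow
      calc pvR N y (k+1) ≤ 2 ^ N - 1 := Nat.and_le_right
        _ < 2 ^ N := by omega

theorem pvBit_succ (N y k x : Nat) (hy : y < N) (hx : x < N) :
    (pvR N y (k+1)).testBit x =
      ((decide (1 ≤ x) && (pvR N y k).testBit (x - 1)) ^^ (pvR N y k).testBit (x + 1)) := by
  have hr := pvR_lt N y k hy
  show (pvStep N (pvR N y k)).testBit x = _
  unfold pvStep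
  rw [Nat.testBit_land, Nat.testBit_two_pow_sub_one, Nat.testBit_xor,
    Nat.testBit_shiftLeft, Nat.testBit_shiftRight]
  have h1 : (pvR N y k).testBit (1 + x) = (pvR N y k).testBit (x + 1) := by ring_nf
  rw [h1]
  simp [hx, ge_iff_le]

theorem bxor_bits (a b : Bool) :
    PySem.Int.bxor (if a then (1:Int) else 0) (if b then (1:Int) else 0) =
      if (a ^^ b) then 1 else 0 := by
  cases a <;> cases b <;> decide

theorem pvCA_eq_pvCell (N y : Nat) (hy : y < N) :
    ∀ k x, x < N → pvCA N y k x = pvCell N y k x := by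
  intro k
  induction k with
  | zero =>
      intro x hx
      simp only [pvCA, pvCell, pvR, Nat.testBit_two_pow]
      by_cases h : x = y <;> simp [h] <;> omega
  | succ k ih =>
      intro x hx
      have hr := pvR_lt N y k hy
      rw [pvCell, pvBit_succ N y k x hy hx]
      show PySem.Int.bxor (if 1 ≤ x then pvCA N y k (x - 1) else 0)
          (if x + 1 < N then pvCA N y k (x + 1) else 0) = _
      have e1 : (if 1 ≤ x then pvCA N y k (x - 1) else 0)
          = if (decide (1 ≤ x) && (pvR N y k).testBit (x - 1)) then 1 else 0 := by
        by_cases h : 1 ≤ x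
        · rw [if_pos h, ih (x-1) (by omega)]; simp [pvCell, h]
        · simp [h]
      have e2 : (if x + 1 < N then pvCA N y k (x + 1) else 0)
          = if (pvR N y k).testBit (x + 1) then 1 else 0 := by
        by_cases h : x + 1 < N
        · rw [if_pos h, ih (x+1) h]; rfl
        · rw [if_neg h, Nat.testBit_lt_two_pow
            (lt_of_lt_of_le hr (Nat.pow_le_pow_right (by norm_num) (by omega)))]
          simp
      rw [e1, e2, bxor_bits]

-- if a shifted natCast & 1: extract a bit
theorem band_shift_bit (m x : Nat) :
    PySem.Int.band (((m : Nat) : Int) >>> x) 1 = if m.testBit x then 1 else 0 := by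
  rw [← Int.natCast_shiftRight]
  rw [show (1:Int) = ((1:Nat):Int) from rfl, PySem.Int.band_natCast]
  rw [Nat.and_one_is_mod, Nat.testBit, Nat.one_and_eq_mod_two]
  rcases Nat.mod_two_eq_zero_or_one (m >>> x) with h | h <;> simp [h]

theorem cast_step (N : Nat) (m : Nat) :
    PySem.Int.band (PySem.Int.bxor (((m:Nat):Int) <<< (1:Nat)) (((m:Nat):Int) >>> (1:Nat)))
      ((1:Int) <<< N - 1) = ((pvStep N m : Nat) : Int) := by
  unfold pvStep
  rw [← Int.natCast_shiftRight, ← Int.natCast_shiftLeft, PySem.Int.bxor_natCast]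
  rw [show (1:Int) <<< N - 1 = (((2^N - 1 : Nat)) : Int) by
    rw [show (1:Int) = ((1:Nat):Int) from rfl, ← Int.natCast_shiftLeft]
    have h2 : (1:Nat) <<< N = 2 ^ N := by rw [Nat.shiftLeft_eq]; ring
    rw [h2]
    have h1 : (1:Nat) ≤ 2 ^ N := Nat.one_le_two_pow
    push_cast [h1]
    ring]
  rw [PySem.Int.band_natCast]

-- generic fold lemmas
theorem modify_modify' {α : Type} (M : List α) (j : Nat) (f g : α → α) :
    (M.modify j f).modify j g = M.modify j (fun a => g (f a)) := by
  induction M generalizing j with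
  | nil => simp
  | cons a t ih => cases j <;> simp [List.modify_cons, ih]

theorem foldl_const_modify {α β : Type} (j : Nat) (g : β → α → α) (l : List β) (M : List α) :
    l.foldl (fun M x => M.modify j (g x)) M = M.modify j (fun L => l.foldl (fun L x => g x L) L) := by
  induction l generalizing M with
  | nil => exact (List.modify_id j M).symm
  | cons a t ih =>
      simp only [List.foldl_cons]
      rw [ih, modify_modify']

theorem modify_append_cons {α : Type} [Inhabited α] (xs : List α) (a : α) (ys : List α) (f : α → α) :
    (xs ++ a :: ys).modify xs.length f = xs ++ f a :: ys := by
  simp [List.modify_eq_set]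

theorem foldl_modify_range {α : Type} [Inhabited α] (F : Nat → α → α) (G : Nat → α) (L : List α) (m : Nat)
    (hm : m ≤ L.length)
    (hF : ∀ y (hy : y < m), F y (L[y]'(lt_of_lt_of_le hy hm)) = G y) :
    List.foldl (fun l y => l.modify y (F y)) L (List.range m) = (List.range m).map G ++ L.drop m := by
  induction m with
  | zero => simp
  | succ m ih =>
      rw [List.range_succ, List.foldl_append, ih (by omega) (fun y hy => hF y (by omega))]
      have hmL : m < L.length := by omega
      rw [List.foldl_cons, List.foldl_nil, List.drop_eq_getElem_cons hmL]
      have h2 := modify_append_cons ((List.range m).map G) (L[m]) (L.drop (m+1)) (F m)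
      simp only [List.length_map, List.length_range] at h2
      rw [h2, hF m (by omega)]
      simp

def zlN (N : Nat) : List (List Int) := (List.range N).map (fun _ => List.replicate N (0:Int))

def pvMM (N j : Nat) : List (List (List Int)) :=
  (List.range (N+1)).map (fun k => if k ≤ j then pvLayerA N k else zlN N)

theorem set_map_range {α : Type} (f : Nat → α) (m i : Nat) (v : α) :
    ((List.range m).map f).set i v = (List.range m).map (fun k => if k = i then v else f k) := by
  apply List.ext_getElem (by simp)
  intro k h1 h2
  simp only [List.getElem_set, List.getElem_map, List.getElem_range]
  by_cases h : k = i <;> simp [h] <;> omega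

theorem row_fold {N : Nat} (v : Nat → Int) :
    List.foldl (fun row x => row.set x (v x)) (List.replicate N (0:Int)) (List.range N)
      = (List.range N).map v := by
  simp only [List.set_eq_modify]
  rw [foldl_modify_range (fun x (_ : Int) => v x) v _ N (by simp) (fun y hy => rfl)]
  simp

theorem layer_fold {N : Nat} (v : Nat → Nat → Int) :
    List.foldl (fun L y => L.modify y (fun row =>
        List.foldl (fun row x => row.set x (v y x)) row (List.range N)))
      (zlN N) (List.range N)
      = (List.range N).map (fun y => (List.range N).map (v y)) := by
  rw [foldl_modify_range _ (fun y => (List.range N).map (v y)) _ N (by simp [zlN])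
    (fun y hy => by simp [zlN]; exact row_fold (v y))]
  simp [zlN]

theorem pyGetD_map_range {α : Type} (f : Nat → α) (N : Nat) (y : Nat) (d : α) (hy : y < N) :
    PySem.List.pyGetD ((List.range N).map f) (y : Int) d = f y := by
  rw [PySem.List.pyGetD_eq_getElem _ d (by positivity) (by simp [hy])]
  simp

theorem pvVal_step (N j y x : Nat) (hy : y < N) (hx : x < N) :
    PySem.Int.bxor (pvV (N:Int) (pvLayerA N j) (y:Int) ((x:Int) - 1))
      (pvV (N:Int) (pvLayerA N j) (y:Int) ((x:Int) + 1)) = pvCA N y (j+1) x := by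
  show _ = PySem.Int.bxor (if 1 ≤ x then pvCA N y j (x-1) else 0)
      (if x+1 < N then pvCA N y j (x+1) else 0)
  congr 1
  · unfold pvV
    by_cases h1 : 1 ≤ x
    · have e : (x:Int) - 1 = ((x-1 : Nat) : Int) := by omega
      rw [if_pos ⟨by omega, by omega⟩, e]
      unfold pvLayerA
      rw [pyGetD_map_range _ N y [] hy, pyGetD_map_range _ N (x-1) 0 (by omega)]
      rw [if_pos h1]
    · rw [if_neg (by omega), if_neg h1]
  · unfold pvV
    by_cases h2 : x + 1 < N
    · have e : (x:Int) + 1 = ((x+1 : Nat) : Int) := by omega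
      rw [if_pos ⟨by omega, by omega⟩, e]
      unfold pvLayerA
      rw [pyGetD_map_range _ N y [] hy, pyGetD_map_range _ N (x+1) 0 h2]
      rw [if_pos h2]
    · rw [if_neg (by omega), if_neg h2]

-- A = spec (layers of pvCA), for n = ↑N
theorem make_mat_d_nat (N : Nat) :
    make_mat_d (N : Int) = (List.range (N + 1)).map (pvLayerA N) := by
  unfold make_mat_d
  have hc : ((N:Int)+1) = ((N+1:Nat) : Int) := by push_cast; ring
  have hd : ((N+1:Nat):Int) - 1 = (N:Int) := by push_cast; ring
  have htn : ∀ j : Nat, ((1:Int) + (j:Int)).toNat = j + 1 := fun j => by omega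
  simp only [hc, hd, PySem.List.pyRange_one, Int.toNat_natCast, add_sub_cancel_left, zero_add,
    sub_zero, List.foldl_map, List.map_map, Function.comp_def, htn]
  simp only [foldl_const_modify]
  -- the two loop bodies, named
  set B2 : List (List (List Int)) → Nat → List (List (List Int)) := fun M j =>
    M.modify (j + 1) fun L =>
      List.foldl
        (fun L y =>
          L.modify y fun row =>
            List.foldl
              (fun row x =>
                row.set x
                  (PySem.Int.bxor (pvV (↑N) (PySem.List.pyGetD M ↑j []) (↑y) (↑x - 1))
                    (pvV (↑N) (PySem.List.pyGetD M ↑j []) (↑y) (↑x + 1))))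
              row (List.range N))
        L (List.range N) with hB2
  have hstep : ∀ j, j < N → B2 (pvMM N j) j = pvMM N (j+1) := by
    intro j hj
    rw [hB2]
    have hA : PySem.List.pyGetD (pvMM N j) (j:Int) [] = pvLayerA N j := by
      unfold pvMM
      rw [pyGetD_map_range _ (N+1) j [] (by omega)]
      simp
    simp only [hA]
    rw [List.modify_eq_set]
    have hz : (pvMM N j)[j+1]?.getD default = zlN N := by
      unfold pvMM
      have h1 : j + 1 < N + 1 := by omega
      simp [h1, show ¬(j+1 ≤ j) by omega]
    rw [hz, layer_fold]
    have hlay : (List.range N).map (fun y => (List.range N).map (fun x =>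
        PySem.Int.bxor (pvV ((N:Nat):Int) (pvLayerA N j) ((y:Nat):Int) (((x:Nat):Int) - 1))
          (pvV ((N:Nat):Int) (pvLayerA N j) ((y:Nat):Int) (((x:Nat):Int) + 1))))
        = pvLayerA N (j+1) := by
      unfold pvLayerA
      apply List.map_congr_left
      intro y hy
      apply List.map_congr_left
      intro x hx
      exact pvVal_step N j y x (List.mem_range.mp hy) (List.mem_range.mp hx)
    rw [hlay]
    unfold pvMM
    rw [set_map_range]
    apply List.map_congr_left
    intro k _
    by_cases h : k = j + 1
    · simp [h]
    · by_cases h2 : k ≤ j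
      · simp [h, h2, show k ≤ j + 1 by omega]
      · simp [h, h2, show ¬(k ≤ j + 1) by omega]
  have main : List.foldl B2 (pvMM N 0) (List.range N) = List.map (pvLayerA N) (List.range (N+1)) := by
    have hloop : ∀ m, m ≤ N → List.foldl B2 (pvMM N 0) (List.range m) = pvMM N m := by
      intro m
      induction m with
      | zero => intro _; simp
      | succ m ih =>
          intro hm
          rw [List.range_succ, List.foldl_append, ih (by omega), List.foldl_cons, List.foldl_nil,
            hstep m (by omega)]
    rw [hloop N le_rfl]
    unfold pvMM
    apply List.map_congr_left
    intro k hk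
    simp [Nat.lt_succ_iff.mp (List.mem_range.mp hk)]
  refine (congrArg (fun M0 => List.foldl B2 M0 (List.range N)) (?_ : _ = pvMM N 0)).trans main
  rw [List.modify_eq_set]
  have h00 : ((List.range (N+1)).map (fun _ : Nat =>
      (List.range N).map (fun _ : Nat => List.replicate N (0:Int))))[0]?.getD default = zlN N := by
    simp [zlN]
  rw [h00, layer_fold]
  have hlay0 : (List.range N).map (fun y => (List.range N).map (fun x =>
      PySem.List.pyGetD (PySem.List.pyGetD
        ((List.range N).map (fun k => (List.range N).map
          (fun i => if ((i:Nat):Int) = ((k:Nat):Int) then (1:Int) else 0)))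
        ((y:Nat):Int) []) ((x:Nat):Int) 0)) = pvLayerA N 0 := by
    unfold pvLayerA
    apply List.map_congr_left
    intro y hy
    apply List.map_congr_left
    intro x hx
    rw [pyGetD_map_range _ N y [] (List.mem_range.mp hy),
      pyGetD_map_range _ N x 0 (List.mem_range.mp hx)]
    show _ = if x = y then (1:Int) else 0
    by_cases h : x = y
    · simp [h]
    · simp [h, show ¬((x:Int) = (y:Int)) by exact_mod_cast h]
  rw [hlay0, set_map_range]
  unfold pvMM
  apply List.map_congr_left
  intro k _
  by_cases h : k = 0
  · simp [h, zlN]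
  · simp [h, show ¬(k ≤ 0) by omega, zlN]

-- B = spec, for n = ↑N
theorem alt_fold (N : Nat) (l : List Int) : ∀ (j : Nat),
    l.foldl
      (fun (st : List (List (List Int)) × List Int) _k =>
        (st.1 ++ [st.2.map (fun (r : Int) =>
            (PySem.List.pyRange 0 (N:Int)).map (fun x => PySem.Int.band (r >>> x.toNat) 1))],
         st.2.map (fun (r : Int) => PySem.Int.band (PySem.Int.bxor (r <<< (1:Nat)) (r >>> (1:Nat)))
           ((1:Int) <<< N - 1))))
      ((List.range j).map (pvLayer N), (List.range N).map (fun y => ((pvR N y j : Nat) : Int)))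
    = ((List.range (j + l.length)).map (pvLayer N),
       (List.range N).map (fun y => ((pvR N y (j + l.length) : Nat) : Int))) := by
  induction l with
  | nil => intro j; simp
  | cons a t ih =>
      intro j
      rw [List.foldl_cons]
      have hlay : ((List.range N).map (fun y => ((pvR N y j : Nat) : Int))).map
          (fun (r : Int) => (PySem.List.pyRange 0 (N:Int)).map
            (fun x => PySem.Int.band (r >>> x.toNat) 1)) = pvLayer N j := by
        rw [List.map_map, pvLayer]
        apply List.map_congr_left
        intro y _
        simp only [Function.comp_apply]
        rw [PySem.List.pyRange_zero_natCast, List.map_map]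
        apply List.map_congr_left
        intro x _
        simp only [Function.comp_apply, Int.toNat_natCast, Int.shiftRight_natCast_right, band_shift_bit]
        rfl
      have hrows : ((List.range N).map (fun y => ((pvR N y j : Nat) : Int))).map
          (fun (r : Int) => PySem.Int.band (PySem.Int.bxor (r <<< (1:Nat)) (r >>> (1:Nat)))
            ((1:Int) <<< N - 1)) = (List.range N).map (fun y => ((pvR N y (j+1) : Nat) : Int)) := by
        rw [List.map_map]
        apply List.map_congr_left
        intro y _
        simp only [Function.comp_apply, cast_step]
        rfl
      simp only [hlay, hrows]
      have : (List.range j).map (pvLayer N) ++ [pvLayer N j] = (List.range (j+1)).map (pvLayer N) := by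
        rw [List.range_succ, List.map_append]; rfl
      rw [this, ih (j+1)]
      simp only [List.length_cons]
      rw [show j + (t.length+1) = j+1+t.length by omega]

theorem make_mat_d_alt_nat (N : Nat) : make_mat_d_alt (N:Int) = pvSpecM N := by
  unfold make_mat_d_alt
  simp only []
  have hmask : (if (0:Int) ≤ (N:Int) then (1:Int) <<< ((N:Int)).toNat - 1 else 0)
      = (1:Int) <<< N - 1 := by
    simp
  have hrows : (PySem.List.pyRange 0 (N:Int)).map (fun y => (1:Int) <<< y.toNat)
      = (List.range N).map (fun y => ((pvR N y 0 : Nat) : Int)) := by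
    rw [PySem.List.pyRange_zero_natCast, List.map_map]
    apply List.map_congr_left; intro y _
    simp only [Function.comp_apply, Int.toNat_natCast, Int.shiftLeft_natCast_right]
    rw [show (1:Int) = ((1:Nat):Int) from rfl, ← Int.natCast_shiftLeft, Nat.shiftLeft_eq]
    simp [pvR]
  have hrange : PySem.List.pyRange 0 ((N:Int)+1) = (List.range (N+1)).map (Nat.cast : Nat → Int) := by
    rw [show ((N:Int)+1) = ((N+1 : Nat) : Int) by push_cast; ring, PySem.List.pyRange_zero_natCast]
  rw [hmask, hrows, hrange]
  have h := alt_fold N ((List.range (N+1)).map (Nat.cast : Nat → Int)) 0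
  simp only [List.range_zero, List.map_nil] at h
  rw [h]
  simp [pvSpecM]


theorem neg_case (n : Int) (hn : n < 0) : make_mat_d n = make_mat_d_alt n := by
  have h0 : n ≤ 0 := le_of_lt hn
  have h1 : n + 1 ≤ 0 := by omega
  have h2 : n + 1 ≤ 1 := by omega
  unfold make_mat_d make_mat_d_alt
  simp [PySem.List.pyRange_one_eq_nil h0, PySem.List.pyRange_one_eq_nil h1,
    PySem.List.pyRange_one_eq_nil h2]

-- ===== VERDICT (by name: the statement is the Claim_ definition above) =====
theorem make_mat_d_spec : Claim_equal_make_mat_d := by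
  intro n _
  unfold Spec_make_mat_d
  rcases lt_or_ge n 0 with hn | hn
  · exact neg_case n hn
  · obtain ⟨N, rfl⟩ : ∃ N : Nat, n = (N : Int) := ⟨n.toNat, (Int.toNat_of_nonneg hn).symm⟩
    rw [make_mat_d_nat, make_mat_d_alt_nat]
    unfold pvSpecM
    apply List.map_congr_left
    intro k _
    unfold pvLayerA pvLayer
    apply List.map_congr_left
    intro y hy
    apply List.map_congr_left
    intro x hx
    exact pvCA_eq_pvCell N y (List.mem_range.mp hy) k x (List.mem_range.mp hx)
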